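-- pv_equiv track=rewrite | github.com/JKDMarks/adventofcode | 2020/day10/solution.py | is_valid_skip
-- ===== SOURCE A (Python) =====
-- def is_valid_skip(input, skip):
--     copy = input[:]
--     for n in skip:
--         copy.remove(n)
--
--     for (i, n) in enumerate(copy):
--         if i == len(copy) - 1:
--             continue
--         else:
--             next = copy[i + 1]
--             if n + 3 < next:
--                 return False
--
--     return True
-- ===== SOURCE B (Python) =====
-- def is_valid_skip(input, skip):
--     remaining = {}
--     for v in skip:
--         remaining[v] = remaining.get(v, 0) + 1
--     filtered = []
--     removed = 0
--     for x in input: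
--         if remaining.get(x, 0) > 0:
--             remaining[x] -= 1
--             removed += 1
--         else:
--             filtered.append(x)
--     if removed != len(skip):
--         raise ValueError("skip value not in input")
--     return all(a + 3 >= b for a, b in zip(filtered, filtered[1:]))
-- ===== Notes on version B (the rewrite author's own statement) =====
-- stated objective: faster
-- what changed: Replaces A's per-element list.remove scans with a single dict-counter built from skip and one left-to-right filtering pass over input (raising the same ValueError when a skip value is missing), and replaces the index-based enumerate/copy[i+1] gap loop with an all() over zip(filtered, filtered[1:]).
import Mathlib
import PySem

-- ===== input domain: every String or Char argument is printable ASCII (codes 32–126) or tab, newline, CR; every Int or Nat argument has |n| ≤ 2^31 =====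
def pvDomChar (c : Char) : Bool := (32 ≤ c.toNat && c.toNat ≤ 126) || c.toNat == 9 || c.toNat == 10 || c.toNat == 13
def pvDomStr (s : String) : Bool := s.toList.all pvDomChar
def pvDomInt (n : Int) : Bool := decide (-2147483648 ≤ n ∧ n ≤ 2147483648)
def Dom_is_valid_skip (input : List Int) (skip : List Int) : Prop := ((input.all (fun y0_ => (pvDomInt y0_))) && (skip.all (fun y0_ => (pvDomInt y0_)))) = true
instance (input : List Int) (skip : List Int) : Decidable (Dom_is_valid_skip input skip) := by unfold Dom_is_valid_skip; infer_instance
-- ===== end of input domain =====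

-- B replaces A's quadratic repeated list.remove by a one-pass multiset (dict-counter) filter
-- and a zip-based gap check (objective: faster, O(n+m) vs O(n·m) filtering).

-- ===== PORT A =====
-- the 'for (i, n) in enumerate(copy): …' loop of A, copy fixed for the copy[i+1] lookup
def isValidSkipGapA (copy : List Int) : List (Int × Int) → Bool
  | [] => true
  | (i, n) :: rest =>
    if i = (copy.length : Int) - 1 then isValidSkipGapA copy rest
    else
      match PySem.List.pyGet? copy (i + 1) with
      | none => true  -- unreachable: enumerate keeps i + 1 in range whenever i ≠ len - 1
      | some next => if n + 3 < next then false else isValidSkipGapA copy rest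

def is_valid_skip (input : List Int) (skip : List Int) : Bool :=
  -- copy = input[:]; for n in skip: copy.remove(n)   (none = ValueError, excluded by Pre_)
  match skip.foldl (fun o n => o.bind (fun l => PySem.List.remove? l n)) (some input) with
  | none => false
  | some copy => isValidSkipGapA copy (PySem.List.enumerate copy 0)

-- ===== PORT B =====
def is_valid_skip_alt (input : List Int) (skip : List Int) : Bool :=
  let remaining := skip.foldl (fun d v => d.insert v (d.getD v 0 + 1)) PySem.Dict.empty
  let res :=
    input.foldl
      (fun (s : PySem.Dict Int Int × List Int × Int) x =>
        if 0 < s.1.getD x 0 then (s.1.insert x (s.1.getD x 0 - 1), s.2.1, s.2.2 + 1)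
        else (s.1, s.2.1 ++ [x], s.2.2))
      (remaining, ([] : List Int), (0 : Int))
  if res.2.2 ≠ (skip.length : Int) then false  -- B raises ValueError here (outside Pre_)
  else
    let filtered := res.2.1
    (filtered.zip (PySem.List.slice filtered (some 1) none)).all (fun p => p.1 + 3 ≥ p.2)

-- ===== PRECONDITION & SPEC =====
-- Pre_: every skip value is removable, i.e. skip is a sub-multiset of input; otherwise
-- list.remove raises ValueError in A (and B raises ValueError from its removed-count check).
def Pre_is_valid_skip (input : List Int) (skip : List Int) : Prop :=
  ∀ v ∈ skip, skip.count v ≤ input.count v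
instance (input : List Int) (skip : List Int) : Decidable (Pre_is_valid_skip input skip) := by
  unfold Pre_is_valid_skip; infer_instance

def pvWitness_is_valid_skip : List Int × List Int := ([1, 2, 3, 10], [2])

def Spec_is_valid_skip (input : List Int) (skip : List Int) (out : Bool) : Prop := out = is_valid_skip_alt input skip
instance (input : List Int) (skip : List Int) (out : Bool) : Decidable (Spec_is_valid_skip input skip out) := by unfold Spec_is_valid_skip; infer_instance

-- ===== CLAIM (what is proved, stated in full; the proofs are below) =====
def Claim_equal_is_valid_skip : Prop := ∀ (input : List Int) (skip : List Int), Dom_is_valid_skip input skip → Pre_is_valid_skip input skip → Spec_is_valid_skip input skip (is_valid_skip input skip)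

-- ===== LEMMAS AND PROOFS =====

-- reference filter: drop the first (c v) occurrences of each value v
def pfilter (c : Int → Int) : List Int → List Int
  | [] => []
  | x :: xs => if 0 < c x then pfilter (Function.update c x (c x - 1)) xs else x :: pfilter c xs

-- reference chain gap check
def gapChain : List Int → Bool
  | [] => true
  | [_] => true
  | a :: b :: rest => if a + 3 < b then false else gapChain (b :: rest)

theorem pfilter_zero (l : List Int) : pfilter (fun _ => 0) l = l := by
  induction l with
  | nil => rfl
  | cons x xs ih => simp [pfilter, ih]

theorem pfilter_update (l : List Int) (c : Int → Int) (n : Int)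
    (hmem : n ∈ l) (hnn : ∀ v, 0 ≤ c v) :
    pfilter (Function.update c n (c n + 1)) l = pfilter c (l.erase n) := by
  induction l generalizing c with
  | nil => cases hmem
  | cons x xs ih =>
    by_cases hx : x = n
    · subst hx
      have h1 : (0 : Int) < Function.update c x (c x + 1) x := by
        simp [Function.update_self]; have := hnn x; omega
      rw [List.erase_cons_head]
      simp only [pfilter, Function.update_self, Function.update_idem]
      have h2 : c x + 1 - 1 = c x := by omega
      rw [h2, Function.update_eq_self, if_pos (by have := hnn x; omega)]
    · have hxn : Function.update c n (c n + 1) x = c x := Function.update_of_ne hx _ _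
      have hmem' : n ∈ xs := by
        rcases List.mem_cons.mp hmem with h | h
        · exact absurd h.symm hx
        · exact h
      rw [List.erase_cons_tail (by simp [hx])]
      by_cases hc : 0 < c x
      · simp only [pfilter, hxn, if_pos hc]
        rw [Function.update_comm (Ne.symm hx)]
        have hnn' : ∀ v, 0 ≤ Function.update c x (c x - 1) v := fun v => by
          by_cases hv : v = x
          · subst hv; simp [Function.update_self]; omega
          · rw [Function.update_of_ne hv]; exact hnn v
        have h3 := ih (Function.update c x (c x - 1)) hmem' hnn'
        simp only [Function.update_of_ne (Ne.symm hx)] at h3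
        exact h3
      · simp only [pfilter, hxn, if_neg hc]
        rw [ih _ hmem' hnn]

theorem removeAll_eq_pfilter (sk : List Int) (l : List Int)
    (h : ∀ v, sk.count v ≤ l.count v) :
    sk.foldl (fun o n => o.bind (fun m => PySem.List.remove? m n)) (some l)
      = some (pfilter (fun v => (sk.count v : Int)) l) := by
  induction sk generalizing l with
  | nil =>
    simp only [List.foldl_nil, List.count_nil, Nat.cast_zero, pfilter_zero]
  | cons n sk ih =>
    have hcnt := h n
    simp only [List.count_cons_self] at hcnt
    have hmem : n ∈ l := List.count_pos_iff.mp (by omega)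
    rw [List.foldl_cons]
    simp only [Option.bind_some]
    rw [PySem.List.remove?_eq_some_erase l n hmem]
    rw [ih (l.erase n) (fun v => by
      rw [List.count_erase]
      have := h v
      simp only [List.count_cons] at this
      split
      · simp_all; omega
      · simp_all)]
    congr 1
    have hfun : (fun v => ((List.count v (n :: sk) : Nat) : Int))
        = Function.update (fun v => ((List.count v sk : Nat) : Int)) n ((List.count n sk : Int) + 1) := by
      funext v
      by_cases hv : v = n
      · subst hv; simp [List.count_cons_self, Function.update_self]
      · simp [Function.update_of_ne hv, Ne.symm hv]
    rw [hfun, pfilter_update _ _ _ hmem (fun v => by positivity)]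

theorem bfilter_eq_pfilter (l : List Int) (d : PySem.Dict Int Int) (acc : List Int) (r : Int) :
    (l.foldl
      (fun (s : PySem.Dict Int Int × List Int × Int) x =>
        if 0 < s.1.getD x 0 then (s.1.insert x (s.1.getD x 0 - 1), s.2.1, s.2.2 + 1)
        else (s.1, s.2.1 ++ [x], s.2.2))
      (d, acc, r)).2
      = (acc ++ pfilter (fun v => d.getD v 0) l,
         r + (l.length : Int) - ((pfilter (fun v => d.getD v 0) l).length : Int)) := by
  induction l generalizing d acc r with
  | nil => simp [pfilter]
  | cons x xs ih =>
    rw [List.foldl_cons]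
    by_cases hc : 0 < d.getD x 0
    · simp only [if_pos hc]
      rw [ih]
      have hfun : (fun v => (d.insert x (d.getD x 0 - 1)).getD v 0)
          = Function.update (fun v => d.getD v 0) x (d.getD x 0 - 1) := by
        funext v
        by_cases hv : v = x
        · subst hv; simp [PySem.Dict.getD_insert_self, Function.update_self]
        · rw [PySem.Dict.getD_insert_of_ne d _ _ hv, Function.update_of_ne hv]
      rw [hfun, pfilter, if_pos hc]
      refine Prod.ext rfl ?_
      simp only [List.length_cons]
      push_cast
      ring
    · simp only [if_neg hc]
      rw [ih, pfilter, if_neg hc]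
      refine Prod.ext ?_ ?_
      · simp [List.append_assoc]
      · simp only [List.length_cons]
        push_cast
        ring

-- inside Pre_, the filter removes exactly skip.length elements
theorem pfilter_length (sk : List Int) : ∀ (l : List Int),
    (∀ v, sk.count v ≤ l.count v) →
    (pfilter (fun v => (sk.count v : Int)) l).length + sk.length = l.length := by
  induction sk with
  | nil =>
    intro l _
    simp only [List.count_nil, Nat.cast_zero, pfilter_zero, List.length_nil, Nat.add_zero]
  | cons n sk ih =>
    intro l h
    have hcnt := h n
    simp only [List.count_cons_self] at hcnt
    have hmem : n ∈ l := List.count_pos_iff.mp (by omega)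
    have hfun : (fun v => ((List.count v (n :: sk) : Nat) : Int))
        = Function.update (fun v => ((List.count v sk : Nat) : Int)) n ((List.count n sk : Int) + 1) := by
      funext v
      by_cases hv : v = n
      · subst hv; simp [List.count_cons_self, Function.update_self]
      · simp [Function.update_of_ne hv, Ne.symm hv]
    rw [hfun, pfilter_update _ _ _ hmem (fun v => by positivity)]
    have h2 := ih (l.erase n) (fun v => by
      rw [List.count_erase]
      have := h v
      simp only [List.count_cons] at this
      split
      · simp_all; omega
      · simp_all)
    have h3 : (l.erase n).length = l.length - 1 := List.length_erase_of_mem hmem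
    have h4 : 1 ≤ l.length := List.length_pos_of_mem hmem
    simp only [List.length_cons]
    omega

theorem gapA_suffix (suf : List Int) : ∀ (pre : List Int),
    isValidSkipGapA (pre ++ suf) (PySem.List.enumerate suf (pre.length : Int)) = gapChain suf := by
  induction suf with
  | nil => intro pre; simp [PySem.List.enumerate_nil, isValidSkipGapA, gapChain]
  | cons n suf' ih =>
    intro pre
    rw [PySem.List.enumerate_cons, isValidSkipGapA]
    cases suf' with
    | nil =>
      rw [if_pos (by simp), PySem.List.enumerate_nil]
      simp [isValidSkipGapA, gapChain]
    | cons m rest =>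
      rw [if_neg (by simp only [List.length_append, List.length_cons]; push_cast; omega)]
      have hidx : (pre.length : Int) + 1 = (((pre ++ [n]).length : Nat) : Int) := by
        simp
      have happ : pre ++ n :: m :: rest = (pre ++ [n]) ++ m :: rest := by
        rw [List.append_cons]
      rw [happ, hidx, PySem.List.pyGet?_append_length]
      show (if n + 3 < m then false
        else isValidSkipGapA ((pre ++ [n]) ++ m :: rest)
          (PySem.List.enumerate (m :: rest) (((pre ++ [n]).length : Nat) : Int)))
        = gapChain (n :: m :: rest)
      rw [ih (pre ++ [n]), gapChain]

theorem gapChain_eq_zip (l : List Int) :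
    gapChain l = (l.zip l.tail).all (fun p => p.1 + 3 ≥ p.2) := by
  induction l with
  | nil => rfl
  | cons a l' ih =>
    cases l' with
    | nil => rfl
    | cons b r =>
      rw [gapChain, ih]
      simp only [List.tail_cons, List.zip_cons_cons, List.all_cons]
      by_cases hgap : a + 3 < b
      · simp [hgap, show ¬ (b ≤ a + 3) by omega]
      · simp [hgap, show b ≤ a + 3 by omega]

-- ===== VERDICT (by name: the statement is the Claim_ definition above) =====
theorem is_valid_skip_spec : Claim_equal_is_valid_skip := by
  intro input skip _ hpre
  unfold Spec_is_valid_skip is_valid_skip is_valid_skip_alt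
  have hcnt : ∀ v, skip.count v ≤ input.count v := by
    intro v
    by_cases hv : v ∈ skip
    · exact hpre v hv
    · rw [List.count_eq_zero_of_not_mem hv]; exact Nat.zero_le _
  rw [removeAll_eq_pfilter skip input hcnt]
  dsimp only
  rw [PySem.Dict.foldl_insert_getD_add_one_eq_counter]
  rw [bfilter_eq_pfilter input (PySem.Dict.counter skip) []]
  simp only [List.nil_append]
  have hfun : (fun v => (PySem.Dict.counter skip).getD v 0) = fun v => ((skip.count v : Nat) : Int) := by
    funext v; rw [PySem.Dict.getD_counter]
  rw [hfun, PySem.List.slice_from_one]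
  have hA := gapA_suffix (pfilter (fun v => ((skip.count v : Nat) : Int)) input) []
  simp only [List.nil_append, List.length_nil, Nat.cast_zero] at hA
  have hlen := pfilter_length skip input hcnt
  rw [hA, gapChain_eq_zip, if_neg (by omega)]
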